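-- pv_equiv track=rewrite | github.com/Y2ktorrez/Python | multiplessoluciones.py | multImpares
-- ===== SOURCE A (Python) =====
-- def multImpares(n) :
-- 	c = 1
-- 	mult = 1
-- 	v = -1
-- 	while (c <= n):
-- 		v = v + 2
-- 		mult = mult * v
-- 		c = c + 1
-- 	return mult
-- ===== SOURCE B (Python) =====
-- def multImpares(n):
--     # balanced divide-and-conquer product of the odd numbers 2k+1, k in [0, n)
--     if n < 1:
--         return 1
--     def prod(lo, hi):
--         if hi - lo == 1:
--             return 2 * lo + 1
--         mid = (lo + hi) // 2
--         return prod(lo, mid) * prod(mid, hi)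
--     return prod(0, n)
-- ===== Notes on version B (the rewrite author's own statement) =====
-- stated objective: faster
-- what changed: Replaces the left-to-right while-loop accumulation by a balanced divide-and-conquer product of the odd numbers 2k+1 for k in [0,n).
import Mathlib
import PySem

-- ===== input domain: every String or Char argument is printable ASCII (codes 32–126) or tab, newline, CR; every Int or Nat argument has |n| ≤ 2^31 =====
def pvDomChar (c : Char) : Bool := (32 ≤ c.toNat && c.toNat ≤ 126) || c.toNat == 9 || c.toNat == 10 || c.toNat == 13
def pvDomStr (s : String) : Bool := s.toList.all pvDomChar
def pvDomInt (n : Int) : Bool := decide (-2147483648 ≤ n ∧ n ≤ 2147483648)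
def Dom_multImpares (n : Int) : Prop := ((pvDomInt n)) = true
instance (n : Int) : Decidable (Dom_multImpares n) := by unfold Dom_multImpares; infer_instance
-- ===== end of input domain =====

-- B replaces A's left-to-right while-loop accumulation by a balanced divide-and-conquer product of the odd numbers (measured faster at the largest timed sizes).


-- ===== PORT A =====
-- A's while loop: state (c, mult, v); runs while c ≤ n.
def multImparesGo (n c mult v : Int) : Int :=
  if c ≤ n then multImparesGo n (c + 1) (mult * (v + 2)) (v + 2) else mult
termination_by (n + 1 - c).toNat
decreasing_by omega

def multImpares (n : Int) : Int := multImparesGo n 1 1 (-1)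

-- ===== PORT B =====
-- B's helper prod(lo, hi): balanced product of 2k+1 for k in [lo, hi).
-- Ported with a fuel parameter (hi-lo).toNat, enough for the halving recursion since
-- each recursive call strictly shrinks hi-lo; Python's prod is only called with lo < hi
-- (the fuel-0 / hi-lo ≤ 1 fallbacks are termination guards for unreachable inputs,
-- where Python's prod would diverge).
def oddDCF : Nat → Int → Int → Int
  | 0, _, _ => 1
  | f + 1, lo, hi =>
    if hi - lo = 1 then 2 * lo + 1
    else if hi - lo ≤ 1 then 1
    else
      let mid := PySem.Int.floordiv (lo + hi) 2
      oddDCF f lo mid * oddDCF f mid hi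

def multImpares_alt (n : Int) : Int :=
  if n < 1 then 1 else oddDCF n.toNat 0 n

-- ===== PRECONDITION & SPEC =====
def Spec_multImpares (n : Int) (out : Int) : Prop := out = multImpares_alt n
instance (n : Int) (out : Int) : Decidable (Spec_multImpares n out) := by unfold Spec_multImpares; infer_instance

-- ===== CLAIM (what is proved, stated in full; the proofs are below) =====
def Claim_equal_multImpares : Prop := ∀ (n : Int), Dom_multImpares n → Spec_multImpares n (multImpares n)

-- ===== LEMMAS AND PROOFS =====
-- oddProd k v = (v+2)(v+4)⋯(v+2k)
def oddProd : Nat → Int → Int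
  | 0, _ => 1
  | k + 1, v => (v + 2) * oddProd k (v + 2)

theorem multImparesGo_eq (k : Nat) : ∀ (n c mult v : Int), (n + 1 - c).toNat = k →
    multImparesGo n c mult v = mult * oddProd k v := by
  induction k with
  | zero =>
    intro n c mult v h
    rw [multImparesGo]
    rw [if_neg (by omega)]
    simp [oddProd]
  | succ k ih =>
    intro n c mult v h
    rw [multImparesGo]
    rw [if_pos (by omega)]
    rw [ih n (c + 1) (mult * (v + 2)) (v + 2) (by omega)]
    simp [oddProd]; ring

theorem oddProd_append (a : Nat) : ∀ (b : Nat) (v : Int),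
    oddProd (a + b) v = oddProd a v * oddProd b (v + 2 * a) := by
  induction a with
  | zero => intro b v; simp [oddProd]
  | succ a ih =>
    intro b v
    have h0 : a + 1 + b = (a + b) + 1 := by omega
    have h1 : oddProd ((a + b) + 1) v = (v + 2) * oddProd (a + b) (v + 2) := rfl
    have h2 : oddProd (a + 1) v = (v + 2) * oddProd a (v + 2) := rfl
    rw [h0, h1, ih b (v + 2), h2]
    push_cast
    ring_nf

theorem oddDCF_eq (f : Nat) : ∀ (lo hi : Int), 1 ≤ hi - lo → (hi - lo).toNat ≤ f →
    oddDCF f lo hi = oddProd (hi - lo).toNat (2 * lo - 1) := by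
  induction f with
  | zero => intro lo hi h1 h2; omega
  | succ f ih =>
    intro lo hi h1 _
    rw [oddDCF]
    by_cases he : hi - lo = 1
    · rw [if_pos he, he]
      show 2 * lo + 1 = (2 * lo - 1 + 2) * 1
      ring
    · rw [if_neg he, if_neg (by omega)]
      have hmid := PySem.Int.floordiv_eq_ediv_of_pos (a := lo + hi) (b := 2) (by omega)
      set mid := PySem.Int.floordiv (lo + hi) 2 with hm
      have hb : lo < mid ∧ mid < hi := by rw [hmid]; omega
      show oddDCF f lo mid * oddDCF f mid hi = _
      rw [ih lo mid (by omega) (by omega), ih mid hi (by omega) (by omega)]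
      have hsum : (hi - lo).toNat = (mid - lo).toNat + (hi - mid).toNat := by omega
      rw [hsum, oddProd_append]
      have hv : 2 * lo - 1 + 2 * ((mid - lo).toNat : Int) = 2 * mid - 1 := by omega
      rw [hv]

theorem alt_eq (n : Int) : multImpares_alt n = oddProd n.toNat (-1) := by
  rw [multImpares_alt]
  by_cases h : n < 1
  · rw [if_pos h]
    have : n.toNat = 0 := by omega
    rw [this]; rfl
  · rw [if_neg h]
    have := oddDCF_eq n.toNat 0 n (by omega) (by omega)
    simpa using this

-- ===== VERDICT (by name: the statement is the Claim_ definition above) =====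
theorem multImpares_spec : Claim_equal_multImpares := by
  intro n _
  show multImpares n = multImpares_alt n
  rw [multImpares, multImparesGo_eq n.toNat n 1 1 (-1) (by omega), alt_eq, one_mul]
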